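-- pv_equiv track=rewrite | github.com/dflo-ai/sauron_research | scripts/validate-reid-pipeline-accuracy.py | count_id_switches
-- ===== SOURCE A (Python) =====
-- def count_id_switches(assignments: list[list[int]]) -> int:
--     """Count ID switches across frames.
--
--     An ID switch occurs when a track_id disappears for >1 frame
--     and then reappears, or when the same spatial position gets
--     a different ID.
--     """
--     # Track last seen frame per ID
--     last_seen: dict[int, int] = {}
--     switches = 0
--
--     for frame_idx, frame_ids in enumerate(assignments):
--         for track_id in frame_ids:
--             if track_id < 0:  # Skip tentative
--                 continue
--             if track_id in last_seen:
--                 gap = frame_idx - last_seen[track_id]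
--                 if gap > 5:  # Re-appeared after >5 frame gap
--                     switches += 1
--             last_seen[track_id] = frame_idx
--
--     return switches
-- ===== SOURCE B (Python) =====
-- def count_id_switches(assignments: list[list[int]]) -> int:
--     """Count ID switches: build per-id occurrence index, then scan gaps."""
--     occ: dict[int, list[int]] = {}
--     for frame_idx, frame_ids in enumerate(assignments):
--         for track_id in frame_ids:
--             if track_id >= 0:
--                 occ.setdefault(track_id, []).append(frame_idx)
--     switches = 0
--     for frames in occ.values():
--         for a, b in zip(frames, frames[1:]):
--             if b - a > 5:
--                 switches += 1
--     return switches
-- ===== Notes on version B (the rewrite author's own statement) =====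
-- stated objective: alternative
-- what changed: Replaces the incremental last_seen dict bookkeeping with a two-phase build-index-then-scan: first group each non-negative id's frame indices into a dict of lists, then count consecutive gaps > 5 per group.
import Mathlib
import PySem

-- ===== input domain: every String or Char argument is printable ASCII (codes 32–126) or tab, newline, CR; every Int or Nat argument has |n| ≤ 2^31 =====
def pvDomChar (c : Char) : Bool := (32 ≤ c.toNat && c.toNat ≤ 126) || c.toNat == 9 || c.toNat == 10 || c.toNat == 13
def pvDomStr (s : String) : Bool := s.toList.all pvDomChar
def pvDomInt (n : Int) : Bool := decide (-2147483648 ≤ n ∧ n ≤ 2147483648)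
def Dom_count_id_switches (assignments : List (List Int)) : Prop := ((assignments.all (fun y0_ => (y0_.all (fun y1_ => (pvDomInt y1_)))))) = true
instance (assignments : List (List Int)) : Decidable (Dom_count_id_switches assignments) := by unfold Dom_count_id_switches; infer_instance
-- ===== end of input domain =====

-- B replaces A's incremental last_seen bookkeeping with a build-index-then-scan decomposition
-- (group each id's frame indices, then count consecutive gaps > 5); same cost, alternative structure.

-- ===== PORT A =====
-- literal port of A: fold over enumerate(assignments), state = (last_seen dict, switches).
-- 'last_seen[track_id]' is read only under the 'track_id in last_seen' guard, so getD is exact there.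
def count_id_switches (assignments : List (List Int)) : Int :=
  (((PySem.List.enumerate assignments).foldl
    (fun (st : PySem.Dict Int Int × Int) fi =>
      fi.2.foldl
        (fun st t =>
          if t < 0 then st
          else
            let switches := if st.1.contains t then
                (if fi.1 - st.1.getD t 0 > 5 then st.2 + 1 else st.2)
              else st.2
            (st.1.insert t fi.1, switches))
        st)
    (PySem.Dict.empty, 0)) : PySem.Dict Int Int × Int).2

-- ===== PORT B =====
-- inner gap scan of Source B: sum over zip(frames, frames[1:]) (frames[1:] on a list = drop 1, exact)
def pvGapCount (fs : List Int) : Int :=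
  ((fs.zip (fs.drop 1)).map (fun p => if p.2 - p.1 > 5 then (1 : Int) else 0)).sum

-- literal port of B: build occ : id → list of frame indices (setdefault(t, []).append(i)
-- = modify t [] (· ++ [i])), then sum the per-track gap counts over the dict's values.
def count_id_switches_alt (assignments : List (List Int)) : Int :=
  let occ : PySem.Dict Int (List Int) :=
    (PySem.List.enumerate assignments).foldl
      (fun d fi =>
        fi.2.foldl (fun d t => if 0 ≤ t then d.modify t [] (· ++ [fi.1]) else d) d)
      PySem.Dict.empty
  (occ.values.map pvGapCount).sum

-- ===== PRECONDITION & SPEC =====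
def Spec_count_id_switches (assignments : List (List Int)) (out : Int) : Prop := out = count_id_switches_alt assignments
instance (assignments : List (List Int)) (out : Int) : Decidable (Spec_count_id_switches assignments out) := by unfold Spec_count_id_switches; infer_instance

-- ===== CLAIM (what is proved, stated in full; the proofs are below) =====
def Claim_equal_count_id_switches : Prop := ∀ (assignments : List (List Int)), Dom_count_id_switches assignments → Spec_count_id_switches assignments (count_id_switches assignments)

-- ===== LEMMAS AND PROOFS =====

-- the stream of (track_id, frame_idx) occurrences, negatives removed
def pvPairs (assignments : List (List Int)) : List (Int × Int) :=
  (PySem.List.enumerate assignments).flatMap (fun fi => fi.2.map (fun t => (t, fi.1)))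

def pvQs (assignments : List (List Int)) : List (Int × Int) :=
  (pvPairs assignments).filter (fun q => 0 ≤ q.1)

-- A's unguarded loop body
def pvStepA (st : PySem.Dict Int Int × Int) (q : Int × Int) : PySem.Dict Int Int × Int :=
  (st.1.insert q.1 q.2,
   if st.1.contains q.1 then (if q.2 - st.1.getD q.1 0 > 5 then st.2 + 1 else st.2) else st.2)

-- frame indices at which id k occurs
def pvFramesOf (k : Int) (qs : List (Int × Int)) : List Int :=
  (qs.filter (fun p => p.1 == k)).map (·.2)

-- the common characterisation of both programs
def pvKeySum (qs : List (Int × Int)) : Int :=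
  ((PySem.Set.ofList (qs.map (·.1))).map (fun k => pvGapCount (pvFramesOf k qs))).sum

-- A's literal nested loop equals the pvStepA fold over the filtered occurrence stream
theorem pvA_inner (i : Int) (ts : List Int) (st : PySem.Dict Int Int × Int) :
    ts.foldl
      (fun st t =>
        if t < 0 then st
        else
          let switches := if st.1.contains t then
              (if i - st.1.getD t 0 > 5 then st.2 + 1 else st.2)
            else st.2
          (st.1.insert t i, switches)) st
      = ((ts.map (fun t => (t, i))).filter (fun q => 0 ≤ q.1)).foldl pvStepA st := by
  induction ts generalizing st with
  | nil => rfl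
  | cons t ts ih =>
    by_cases h : t < 0
    · simp only [List.foldl_cons, if_pos h, List.map_cons, List.filter_cons,
        show decide (0 ≤ t) = false by simp; omega]
      exact ih st
    · simp only [List.foldl_cons, if_neg h, List.map_cons, List.filter_cons,
        show decide (0 ≤ t) = true by simp; omega]
      rw [ih]
      rfl

theorem pvA_gen (l : List (Int × List Int)) (st : PySem.Dict Int Int × Int) :
    l.foldl
      (fun st fi =>
        fi.2.foldl
          (fun st t =>
            if t < 0 then st
            else
              let switches := if st.1.contains t then
                  (if fi.1 - st.1.getD t 0 > 5 then st.2 + 1 else st.2)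
                else st.2
              (st.1.insert t fi.1, switches)) st) st
      = ((l.flatMap (fun fi => fi.2.map (fun t => (t, fi.1)))).filter
          (fun q => 0 ≤ q.1)).foldl pvStepA st := by
  induction l generalizing st with
  | nil => rfl
  | cons fi l ih =>
    rw [List.foldl_cons, ih, pvA_inner, List.flatMap_cons, List.filter_append,
      List.foldl_append]

theorem pvA_eq_foldl_qs (assignments : List (List Int)) :
    count_id_switches assignments = ((pvQs assignments).foldl pvStepA (PySem.Dict.empty, 0)).2 := by
  unfold count_id_switches pvQs pvPairs
  rw [pvA_gen]

-- B's literal nested loop equals the modify fold over the same filtered stream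
theorem pvB_inner (i : Int) (ts : List Int) (d : PySem.Dict Int (List Int)) :
    ts.foldl (fun d t => if 0 ≤ t then d.modify t [] (· ++ [i]) else d) d
      = ((ts.map (fun t => (t, i))).filter (fun q => 0 ≤ q.1)).foldl
          (fun d q => d.modify q.1 [] (· ++ [q.2])) d := by
  induction ts generalizing d with
  | nil => rfl
  | cons t ts ih =>
    by_cases h : 0 ≤ t
    · simp only [List.foldl_cons, if_pos h, List.map_cons, List.filter_cons,
        show decide (0 ≤ t) = true by simp; omega]
      rw [ih]
      simp
    · simp only [List.foldl_cons, if_neg h, List.map_cons, List.filter_cons,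
        show decide (0 ≤ t) = false by simp; omega]
      exact ih d

theorem pvB_gen (l : List (Int × List Int)) (d : PySem.Dict Int (List Int)) :
    l.foldl
      (fun d fi =>
        fi.2.foldl (fun d t => if 0 ≤ t then d.modify t [] (· ++ [fi.1]) else d) d) d
      = ((l.flatMap (fun fi => fi.2.map (fun t => (t, fi.1)))).filter
          (fun q => 0 ≤ q.1)).foldl (fun d q => d.modify q.1 [] (· ++ [q.2])) d := by
  induction l generalizing d with
  | nil => rfl
  | cons fi l ih =>
    rw [List.foldl_cons, ih, pvB_inner, List.flatMap_cons, List.filter_append,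
      List.foldl_append]

theorem pvB_eq_foldl_qs (assignments : List (List Int)) :
    count_id_switches_alt assignments
      = ((((pvQs assignments).foldl
            (fun (d : PySem.Dict Int (List Int)) q => d.modify q.1 [] (· ++ [q.2]))
            PySem.Dict.empty).values).map pvGapCount).sum := by
  unfold count_id_switches_alt pvQs pvPairs
  rw [pvB_gen]

theorem pvFramesOf_append (k : Int) (qs : List (Int × Int)) (q : Int × Int) :
    pvFramesOf k (qs ++ [q])
      = pvFramesOf k qs ++ (if q.1 == k then [q.2] else []) := by
  unfold pvFramesOf
  rw [List.filter_append]
  by_cases h : q.1 == k <;> simp [h]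

theorem pvFramesOf_eq_nil_iff (k : Int) (qs : List (Int × Int)) :
    pvFramesOf k qs = [] ↔ k ∉ qs.map (·.1) := by
  unfold pvFramesOf
  simp only [List.map_eq_nil_iff, List.filter_eq_nil_iff, List.mem_map, beq_iff_eq]
  constructor
  · intro h hk
    obtain ⟨q, hq, he⟩ := hk
    exact h q hq he
  · intro h q hq he
    exact h ⟨q, hq, he⟩

theorem pvGapCount_cons_cons (a b : Int) (l : List Int) :
    pvGapCount (a :: b :: l) = (if b - a > 5 then 1 else 0) + pvGapCount (b :: l) := by
  simp [pvGapCount]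

theorem pvGapCount_append (fs : List Int) (i : Int) :
    pvGapCount (fs ++ [i])
      = pvGapCount fs
        + (match fs.getLast? with
           | none => 0
           | some l => if i - l > 5 then 1 else 0) := by
  induction fs with
  | nil => simp [pvGapCount]
  | cons a fs ih =>
    cases fs with
    | nil => simp [pvGapCount]
    | cons b l =>
      have h1 : (a :: b :: l) ++ [i] = a :: ((b :: l) ++ [i]) := rfl
      have h2 : (b :: l) ++ [i] = b :: (l ++ [i]) := rfl
      rw [h1, h2, pvGapCount_cons_cons, ← h2, ih, pvGapCount_cons_cons]
      have : (a :: b :: l).getLast? = (b :: l).getLast? := by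
        simp [List.getLast?_cons_cons]
      rw [this]; ring

theorem pvSum_update (l : List Int) (hl : l.Nodup) (t : Int) (ht : t ∈ l)
    (f g : Int → Int) (h : ∀ k ∈ l, k ≠ t → g k = f k) :
    (l.map g).sum = (l.map f).sum + (g t - f t) := by
  induction l with
  | nil => simp at ht
  | cons a l ih =>
    rcases List.mem_cons.mp ht with rfl | hmem
    · have : ∀ k ∈ l, g k = f k := by
        intro k hk
        exact h k (List.mem_cons_of_mem _ hk) (fun he => (List.nodup_cons.mp hl).1 (he ▸ hk))
      simp [List.map_congr_left this]; ring
    · have ha : a ≠ t := fun he => (List.nodup_cons.mp hl).1 (he ▸ hmem)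
      have := ih (List.nodup_cons.mp hl).2 hmem
        (fun k hk hne => h k (List.mem_cons_of_mem _ hk) hne)
      simp only [List.map_cons, List.sum_cons, this, h a (List.mem_cons_self) ha]; ring

theorem pvLastSeen_eq (qs : List (Int × Int)) (k : Int) :
    ((qs.foldl pvStepA (PySem.Dict.empty, 0)).1).get? k = (pvFramesOf k qs).getLast? := by
  induction qs using List.reverseRecOn with
  | nil => simp [pvFramesOf, PySem.Dict.get?_empty]
  | append_singleton qs q ih =>
    rw [List.foldl_append, List.foldl_cons, List.foldl_nil, pvFramesOf_append]
    show ((_ : PySem.Dict Int Int × Int).1.insert q.1 q.2).get? k = _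
    by_cases h : k = q.1
    · subst h
      rw [PySem.Dict.get?_insert_self]
      simp
    · rw [PySem.Dict.get?_insert_of_ne _ _ h, ih]
      have hb : (q.1 == k) = false := by
        simp only [beq_eq_false_iff_ne]
        exact Ne.symm h
      simp [hb]

theorem pvSwitches_eq (qs : List (Int × Int)) :
    (qs.foldl pvStepA (PySem.Dict.empty, 0)).2 = pvKeySum qs := by
  induction qs using List.reverseRecOn with
  | nil => simp [pvKeySum]
  | append_singleton qs q ih =>
    obtain ⟨t, i⟩ := q
    rw [List.foldl_append, List.foldl_cons, List.foldl_nil]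
    have hget := pvLastSeen_eq qs t
    have hcont : ((qs.foldl pvStepA (PySem.Dict.empty, 0)).1).contains t
        = ((pvFramesOf t qs).getLast?).isSome := by
      rw [PySem.Dict.contains_eq_isSome_get?, hget]
    have hids : (qs ++ [(t, i)]).map (·.1) = qs.map (·.1) ++ [t] := by simp
    by_cases hnil : pvFramesOf t qs = []
    -- first occurrence of t: no switch contribution, a new key with a 1-element list
    · have hnm : t ∉ qs.map (·.1) := (pvFramesOf_eq_nil_iff t qs).mp hnil
      have hc : ((qs.foldl pvStepA (PySem.Dict.empty, 0)).1).contains t = false := by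
        rw [hcont, hnil]; rfl
      show (if _ then _ else _ : Int) = _
      rw [hc]
      simp only [Bool.false_eq_true, if_false, ih]
      unfold pvKeySum
      rw [hids, PySem.Set.ofList_append_singleton,
          PySem.Set.add_of_not_mem (by rw [PySem.Set.mem_ofList _ _]; exact hnm)]
      rw [List.map_append, List.sum_append]
      have hcongr : ∀ k ∈ PySem.Set.ofList (qs.map (·.1)),
          pvGapCount (pvFramesOf k (qs ++ [(t, i)])) = pvGapCount (pvFramesOf k qs) := by
        intro k hk
        have hkne : (t == k) = false := by
          have : k ≠ t := fun he => hnm (he ▸ (PySem.Set.mem_ofList _ _).mp hk)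
          simp; omega
        rw [pvFramesOf_append]; simp [hkne]
      rw [List.map_congr_left hcongr]
      have : pvFramesOf t (qs ++ [(t, i)]) = [i] := by
        rw [pvFramesOf_append, hnil]; simp
      simp [this, pvGapCount]
    -- t seen before: the key set is unchanged, only t's list grows by one frame index
    · obtain ⟨l, hl⟩ : ∃ l, (pvFramesOf t qs).getLast? = some l := by
        cases hx : (pvFramesOf t qs).getLast? with
        | none => exact absurd (List.getLast?_eq_none_iff.mp hx) hnil
        | some l => exact ⟨l, rfl⟩
      have hm : t ∈ qs.map (·.1) := by
        by_contra hn
        exact hnil ((pvFramesOf_eq_nil_iff t qs).mpr hn)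
      have hc : ((qs.foldl pvStepA (PySem.Dict.empty, 0)).1).contains t = true := by
        rw [hcont, hl]; rfl
      have hgd : ((qs.foldl pvStepA (PySem.Dict.empty, 0)).1).getD t 0 = l := by
        rw [PySem.Dict.getD_eq_get?_getD, hget, hl]; rfl
      show (if _ then _ else _ : Int) = _
      rw [hc, if_pos rfl, hgd, ih]
      unfold pvKeySum
      rw [hids, PySem.Set.ofList_append_singleton,
          PySem.Set.add_of_mem (by rw [PySem.Set.mem_ofList _ _]; exact hm)]
      rw [pvSum_update (PySem.Set.ofList (qs.map (·.1))) (PySem.Set.nodup_ofList _) t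
            (by rw [PySem.Set.mem_ofList _ _]; exact hm)
            (fun k => pvGapCount (pvFramesOf k qs))
            (fun k => pvGapCount (pvFramesOf k (qs ++ [(t, i)])))
            (by
              intro k _ hkne
              have hb : (t == k) = false := by simp; omega
              simp [pvFramesOf_append, hb])]
      have hfr : pvFramesOf t (qs ++ [(t, i)]) = pvFramesOf t qs ++ [i] := by
        rw [pvFramesOf_append]; simp
      rw [hfr, pvGapCount_append]
      simp only [hl]
      split_ifs <;> ring

theorem pvB_eq_keySum (assignments : List (List Int)) :
    count_id_switches_alt assignments = pvKeySum (pvQs assignments) := by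
  rw [pvB_eq_foldl_qs]
  set qs := pvQs assignments with hqs
  have hnodup : ((qs.foldl
      (fun (d : PySem.Dict Int (List Int)) q => d.modify q.1 [] (· ++ [q.2]))
      PySem.Dict.empty).keys).Nodup := by
    exact PySem.Dict.nodup_keys_foldl_modify_key qs (·.1) [] (fun _ q => (· ++ [q.2]))
      PySem.Dict.empty (by simp [PySem.Dict.keys_empty])
  have hkeys : (qs.foldl
      (fun (d : PySem.Dict Int (List Int)) q => d.modify q.1 [] (· ++ [q.2]))
      PySem.Dict.empty).keys = PySem.Set.ofList (qs.map (·.1)) := by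
    rw [PySem.Dict.keys_foldl_modify_key]
    simp [PySem.Dict.keys_empty, PySem.Set.update_nil_left]
  have hvals := PySem.Dict.values_eq_map_keys
    (qs.foldl (fun (d : PySem.Dict Int (List Int)) q => d.modify q.1 [] (· ++ [q.2]))
      PySem.Dict.empty) hnodup []
  rw [hvals, hkeys, List.map_map]
  unfold pvKeySum
  congr 1
  apply List.map_congr_left
  intro k _
  have := PySem.Dict.getD_foldl_modify_append qs PySem.Dict.empty k
  simp only [Function.comp]
  rw [PySem.Dict.getD_foldl_modify_append, PySem.Dict.getD_empty]
  rfl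

-- ===== VERDICT (by name: the statement is the Claim_ definition above) =====
theorem count_id_switches_spec : Claim_equal_count_id_switches := by
  intro assignments _
  unfold Spec_count_id_switches
  rw [pvA_eq_foldl_qs, pvSwitches_eq, pvB_eq_keySum]
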